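-- pv_equiv track=rewrite | github.com/raeufroushangar/MICA-Standard | src/seq_partitioner.py | partition_seq_length
-- ===== SOURCE A (Python) =====
-- def partition_seq_length(seq_length):
--     """
--     Partition a given sequence length into sub-subregions for further analysis.
--
--     Args:
--     - seq_length (int): Length of sequence to partition.
--
--     Returns:
--     - subsubregions_0 (list): List of sub-subregions starting from index 0.
--     - subsubregions_15 (list): List of sub-subregions starting from index 15.
--     """
--
--     if not isinstance(seq_length, int):
--         raise ValueError(f"Error: Sequence length must be an integer. Received: {seq_length}")
--
--     if seq_length < 45 or seq_length > 100000:
--         raise ValueError(f"Error: Sequence length must be between 45 and 100000. You entered {seq_length}")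
--
--     # Initialize lists to store sub-subregions
--     subsubregions_0 = []
--     subsubregions_15 = []
--
--     # Process for sub-subregions starting at index 0
--     remaining_seq_length = seq_length
--     start_index = 0
--     subsubregion_number = 1
--     while remaining_seq_length > 0:
--         if remaining_seq_length <= 45:
--             subsubregions_0.append([subsubregion_number, remaining_seq_length, start_index, start_index + remaining_seq_length - 1])
--             break
--         else:
--             subsubregions_0.append([subsubregion_number, 30, start_index, start_index + 29])
--             remaining_seq_length -= 30
--             start_index += 30
--             subsubregion_number += 1
--
--     # Process for sub-subregions starting at index 15
--     if seq_length <= 45: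
--         subsubregions_15.append([1, seq_length, 0, seq_length - 1])
--     else:
--         remaining_seq_length = seq_length - 30
--         start_index = 15
--         subsubregion_number = 1
--         while remaining_seq_length > 0:
--             if remaining_seq_length <= 45:
--                 subsubregions_15.append([subsubregion_number, remaining_seq_length, start_index, start_index + remaining_seq_length - 1])
--                 break
--             else:
--                 subsubregions_15.append([subsubregion_number, 30, start_index, start_index + 29])
--                 remaining_seq_length -= 30
--                 start_index += 30
--                 subsubregion_number += 1
--     # Return the partitioned sub-subregions
--
--     return subsubregions_0, subsubregions_15
-- ===== SOURCE B (Python) =====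
-- def partition_seq_length(seq_length):
--     if not isinstance(seq_length, int):
--         raise ValueError(f"Error: Sequence length must be an integer. Received: {seq_length}")
--     if seq_length < 45 or seq_length > 100000:
--         raise ValueError(f"Error: Sequence length must be between 45 and 100000. You entered {seq_length}")
--
--     def blocks(total, base):
--         # number of full 30-length blocks before the final (<=45) remainder block
--         m = 0 if total <= 45 else -(-(total - 45) // 30)
--         recs = [[i + 1, 30, base + 30 * i, base + 30 * i + 29] for i in range(m)]
--         recs.append([m + 1, total - 30 * m, base + 30 * m, base + 30 * m + (total - 30 * m) - 1])
--         return recs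
--
--     if seq_length <= 45:
--         subsubregions_15 = [[1, seq_length, 0, seq_length - 1]]
--     else:
--         subsubregions_15 = blocks(seq_length - 30, 15)
--     return blocks(seq_length, 0), subsubregions_15
-- ===== Notes on version B (the rewrite author's own statement) =====
-- stated objective: simpler
-- what changed: Replaces the two subtract-30-per-iteration while loops with a closed-form block count m = ceil((total-45)/30) and a single comprehension over range(m) in a shared helper.
import Mathlib
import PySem

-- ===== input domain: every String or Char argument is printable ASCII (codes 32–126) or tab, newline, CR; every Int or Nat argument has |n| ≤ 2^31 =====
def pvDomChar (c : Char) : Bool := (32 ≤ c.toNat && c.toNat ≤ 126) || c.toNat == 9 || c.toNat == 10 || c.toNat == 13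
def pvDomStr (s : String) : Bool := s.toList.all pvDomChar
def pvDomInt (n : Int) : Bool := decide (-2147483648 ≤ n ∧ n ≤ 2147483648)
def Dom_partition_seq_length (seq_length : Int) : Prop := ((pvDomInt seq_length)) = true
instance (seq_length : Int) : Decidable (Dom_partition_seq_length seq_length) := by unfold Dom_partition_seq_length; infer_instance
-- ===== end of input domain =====

-- B replaces A's two subtract-30 while loops by a closed-form block count and a range comprehension (objective: simpler).

-- ===== PORT A =====
-- A's while loop: while remaining > 0: emit/stop on remaining <= 45, else emit a 30-block and advance.
def pvALoop (remaining start_index num : Int) (acc : List (List Int)) : List (List Int) :=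
  if 0 < remaining then
    if remaining ≤ 45 then
      acc ++ [[num, remaining, start_index, start_index + remaining - 1]]
    else
      pvALoop (remaining - 30) (start_index + 30) (num + 1)
        (acc ++ [[num, 30, start_index, start_index + 29]])
  else acc
termination_by remaining.toNat
decreasing_by omega

def partition_seq_length (seq_length : Int) : List (List Int) × List (List Int) :=
  let subsubregions_0 := pvALoop seq_length 0 1 []
  let subsubregions_15 :=
    if seq_length ≤ 45 then [[1, seq_length, 0, seq_length - 1]]
    else pvALoop (seq_length - 30) 15 1 []
  (subsubregions_0, subsubregions_15)

-- ===== PORT B =====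
-- B's blocks helper: m = 0 if total <= 45 else -(-(total-45)//30), comprehension over range(m), plus final record.
def pvBlocks (total base : Int) : List (List Int) :=
  let m : Int := if total ≤ 45 then 0 else -(PySem.Int.floordiv (-(total - 45)) 30)
  ((List.range m.toNat).map (fun (i : Nat) => ([(i : Int) + 1, 30, base + 30 * (i : Int), base + 30 * (i : Int) + 29] : List Int))) ++
    [[m + 1, total - 30 * m, base + 30 * m, base + 30 * m + (total - 30 * m) - 1]]

def partition_seq_length_alt (seq_length : Int) : List (List Int) × List (List Int) :=
  let subsubregions_15 :=
    if seq_length ≤ 45 then [[1, seq_length, 0, seq_length - 1]]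
    else pvBlocks (seq_length - 30) 15
  (pvBlocks seq_length 0, subsubregions_15)

-- ===== PRECONDITION & SPEC =====
-- A raises ValueError when seq_length < 45 or seq_length > 100000; Pre_ admits exactly the inputs where A returns.
def Pre_partition_seq_length (seq_length : Int) : Prop := 45 ≤ seq_length ∧ seq_length ≤ 100000
instance (seq_length : Int) : Decidable (Pre_partition_seq_length seq_length) := by unfold Pre_partition_seq_length; infer_instance
def pvWitness_partition_seq_length : Int := 77

def Spec_partition_seq_length (seq_length : Int) (out : List (List Int) × List (List Int)) : Prop := out = partition_seq_length_alt seq_length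
instance (seq_length : Int) (out : List (List Int) × List (List Int)) : Decidable (Spec_partition_seq_length seq_length out) := by unfold Spec_partition_seq_length; infer_instance

-- ===== CLAIM (what is proved, stated in full; the proofs are below) =====
def Claim_equal_partition_seq_length : Prop := ∀ (seq_length : Int), Dom_partition_seq_length seq_length → Pre_partition_seq_length seq_length → Spec_partition_seq_length seq_length (partition_seq_length seq_length)

-- ===== LEMMAS AND PROOFS =====

-- closed-form characterisation of B's block count
lemma pvCeil_char (total : Int) (_h : 45 < total) :
    (total - 45) ≤ 30 * (-(PySem.Int.floordiv (-(total - 45)) 30)) ∧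
    30 * (-(PySem.Int.floordiv (-(total - 45)) 30)) < total - 15 := by
  have h30 : (0:Int) < 30 := by norm_num
  have := (PySem.Int.neg_floordiv_neg_eq_iff_of_pos (a := total - 45) (b := 30)
    (q := -(PySem.Int.floordiv (-(total - 45)) 30)) h30).mp rfl
  constructor <;> nlinarith [this.1, this.2]

lemma pvALoop_eq (k : Nat) : ∀ (total base num : Int) (acc : List (List Int)),
    0 < total →
    (if total ≤ 45 then 0 else -(PySem.Int.floordiv (-(total - 45)) 30)) = (k : Int) →
    pvALoop total base num acc =
      acc ++ ((List.range k).map (fun (i : Nat) => ([num + (i : Int), 30, base + 30 * (i : Int), base + 30 * (i : Int) + 29] : List Int))) ++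
        [[num + k, total - 30 * k, base + 30 * k, base + 30 * k + (total - 30 * k) - 1]] := by
  induction k with
  | zero =>
    intro total base num acc hpos hm
    have hle : total ≤ 45 := by
      by_contra hgt
      simp only [if_neg (by omega : ¬ total ≤ 45)] at hm
      have := pvCeil_char total (by omega)
      omega
    rw [pvALoop]
    simp [hpos, hle]
  | succ k ih =>
    intro total base num acc hpos hm
    have hgt : ¬ total ≤ 45 := by
      intro hle
      simp [if_pos hle] at hm
      omega
    simp only [if_neg hgt] at hm
    have hc := pvCeil_char total (by omega)
    rw [hm] at hc
    push_cast at hc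
    rw [pvALoop]
    rw [if_pos hpos, if_neg hgt]
    have hm' : (if total - 30 ≤ 45 then 0 else -(PySem.Int.floordiv (-(total - 30 - 45)) 30)) = (k : Int) := by
      by_cases h75 : total - 30 ≤ 45
      · rw [if_pos h75]; omega
      · rw [if_neg h75]
        have h30 : (0:Int) < 30 := by norm_num
        rw [(PySem.Int.neg_floordiv_neg_eq_iff_of_pos (a := total - 30 - 45) (b := 30) (q := (k:Int)) h30)]
        constructor <;> nlinarith [hc.1, hc.2]
    rw [ih (total - 30) (base + 30) (num + 1) _ (by omega) hm']
    rw [List.range_succ_eq_map]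
    have hmap : (List.map (fun (i : Nat) => ([num + 1 + (i : Int), 30, base + 30 + 30 * (i : Int), base + 30 + 30 * (i : Int) + 29] : List Int)) (List.range k))
        = List.map ((fun (i : Nat) => ([num + (i : Int), 30, base + 30 * i, base + 30 * i + 29] : List Int)) ∘ Nat.succ) (List.range k) := by
      apply List.map_congr_left
      intro i _
      simp only [Function.comp_apply, List.cons.injEq, true_and, and_true]
      push_cast
      omega
    have hfin : ([[num + 1 + (k:Int), total - 30 - 30 * k, base + 30 + 30 * k,
          base + 30 + 30 * k + (total - 30 - 30 * k) - 1]] : List (List Int))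
        = [[num + ((k:Int) + 1), total - 30 * ((k:Int) + 1), base + 30 * ((k:Int) + 1),
          base + 30 * ((k:Int) + 1) + (total - 30 * ((k:Int) + 1)) - 1]] := by
      simp only [List.cons.injEq, true_and, and_true]
      push_cast
      omega
    simp only [List.map_cons, List.append_assoc, List.cons_append, List.nil_append]
    rw [hmap, hfin]
    push_cast
    simp

lemma pvBlocks_eq_loop (total base : Int) (hpos : 0 < total) :
    pvALoop total base 1 [] = pvBlocks total base := by
  set m : Int := if total ≤ 45 then 0 else -(PySem.Int.floordiv (-(total - 45)) 30) with hmdef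
  have hm0 : 0 ≤ m := by
    rw [hmdef]
    split
    · omega
    · next h =>
      have := pvCeil_char total (by omega)
      omega
  have hms : m = (m.toNat : Int) := by omega
  have hkey := pvALoop_eq m.toNat total base 1 [] hpos (by rw [← hmdef]; exact hms)
  rw [hkey, pvBlocks]
  simp only [← hmdef, List.nil_append]
  rw [← hms]
  congr 1
  · apply List.map_congr_left
    intro i _
    simp only [List.cons.injEq, true_and, and_true]
    omega
  · simp only [List.cons.injEq, true_and, and_true]
    omega

-- ===== VERDICT (by name: the statement is the Claim_ definition above) =====
theorem partition_seq_length_spec : Claim_equal_partition_seq_length := by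
  intro n _ hpre
  unfold Spec_partition_seq_length partition_seq_length partition_seq_length_alt
  obtain ⟨h1, h2⟩ := hpre
  by_cases h45 : n ≤ 45
  · simp only [if_pos h45]
    rw [pvBlocks_eq_loop n 0 (by omega)]
  · simp only [if_neg h45]
    rw [pvBlocks_eq_loop n 0 (by omega), pvBlocks_eq_loop (n - 30) 15 (by omega)]
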